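-- pv_equiv track=rewrite | github.com/Leonardox4/Context-Aware-FIrewall-Suricata- | scripts/stratify_benign_799k.py | cap_quotas_to_availability
-- ===== SOURCE A (Python) =====
-- from typing import Dict, List, Tuple
--
-- def cap_quotas_to_availability(
--     quotas: Dict[str, Dict[str, int]],
--     avail: Dict[str, Dict[str, int]],
--     target_n: int,
-- ) -> Dict[str, Dict[str, int]]:
--     """
--     Clip requested (file, proto) quotas to observed counts, then greedily add rows up to target_n
--     where spare capacity exists (avoids shortfall when a stratum is empty in data).
--     """
--     out: Dict[str, Dict[str, int]] = {}
--     for fname, pq in quotas.items():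
--         if fname not in out:
--             out[fname] = {}
--         for proto, q in pq.items():
--             cap = avail.get(fname, {}).get(proto, 0)
--             out[fname][proto] = min(q, cap)
--
--     for fname, pmap in avail.items():
--         if fname not in out:
--             out[fname] = {}
--         for proto in pmap:
--             out[fname].setdefault(proto, 0)
--
--     def total_assigned() -> int:
--         return sum(sum(d.values()) for d in out.values())
--
--     need = target_n - total_assigned()
--     while need > 0:
--         best_f, best_p, best_spare = "", "", -1
--         for fname, pmap in avail.items():
--             for proto, cap in pmap.items():
--                 spare = cap - out[fname].get(proto, 0)
--                 if spare > best_spare: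
--                     best_spare, best_f, best_p = spare, fname, proto
--         if best_spare <= 0:
--             break
--         out[best_f][best_p] = out[best_f].get(best_p, 0) + 1
--         need -= 1
--     return out
-- ===== SOURCE B (Python) =====
-- def _clip_then_register(quotas, avail):
--     out = {}
--     for f, pq in quotas.items():
--         if f not in out:
--             out[f] = {}
--         for p, q in pq.items():
--             cap = avail.get(f, {}).get(p, 0)
--             out[f][p] = min(q, cap)
--     for f, pm in avail.items():
--         if f not in out:
--             out[f] = {}
--         for p in pm:
--             out[f].setdefault(p, 0)
--     return out
--
--
-- def cap_quotas_to_availability(quotas, avail, target_n):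
--     out = _clip_then_register(quotas, avail)
--     need = target_n - sum(sum(d.values()) for d in out.values())
--     while need > 0:
--         bf, bp, bs, ss = "", "", -1, -1
--         for f, pm in avail.items():
--             for p, cap in pm.items():
--                 s = cap - out[f].get(p, 0)
--                 if s > bs:
--                     bf, bp, bs, ss = f, p, s, bs
--                 elif s > ss:
--                     ss = s
--         if bs <= 0:
--             break
--         step = min(need, max(bs - max(ss, 0), 1))
--         out[bf][bp] += step
--         need -= step
--     return out
-- ===== Notes on version B (the rewrite author's own statement) =====
-- stated objective: alternative
-- what changed: The refill loop no longer adds one row per rescan: B tracks the best AND the runner-up spare in a single pass over avail and assigns the whole gap between them (capped by need) in one bulk step, collapsing each run of identical unit increments of A into one iteration; the clipping/zero-fill phase is factored into a helper.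
import Mathlib
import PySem

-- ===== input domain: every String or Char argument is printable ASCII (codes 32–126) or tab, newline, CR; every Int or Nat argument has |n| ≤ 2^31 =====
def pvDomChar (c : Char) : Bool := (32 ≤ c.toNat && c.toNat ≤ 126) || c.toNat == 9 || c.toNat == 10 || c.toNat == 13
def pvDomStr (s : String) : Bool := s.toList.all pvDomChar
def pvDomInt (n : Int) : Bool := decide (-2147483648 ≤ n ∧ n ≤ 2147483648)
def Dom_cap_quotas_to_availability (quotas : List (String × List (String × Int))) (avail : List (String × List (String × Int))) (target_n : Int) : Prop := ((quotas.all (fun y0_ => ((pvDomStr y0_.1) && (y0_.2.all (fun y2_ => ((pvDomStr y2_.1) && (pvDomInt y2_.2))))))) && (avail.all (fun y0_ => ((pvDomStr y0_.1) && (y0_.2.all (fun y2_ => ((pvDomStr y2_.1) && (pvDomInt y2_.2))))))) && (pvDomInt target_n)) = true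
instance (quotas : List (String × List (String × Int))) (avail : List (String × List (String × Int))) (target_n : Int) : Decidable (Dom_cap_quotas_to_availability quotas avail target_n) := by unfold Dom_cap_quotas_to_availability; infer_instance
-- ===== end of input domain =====

-- B replaces A's one-row-per-rescan refill loop by bulk steps (best vs runner-up spare found in one
-- pass, whole gap assigned at once); objective: alternative algorithm of similar size, same results.

-- boundary conversion shared by both ports: the Python arguments are dicts of dicts (assoc lists here)
def pvToDict (x : List (String × List (String × Int))) : PySem.Dict String (PySem.Dict String Int) :=
  PySem.Dict.ofList (x.map (fun fp => (fp.1, PySem.Dict.ofList fp.2)))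

-- ===== PORT A =====
-- argmax scan of A's while-loop body: first (fname, proto) with the strictly largest spare
def pvAScan (availD : PySem.Dict String (PySem.Dict String Int))
    (out : PySem.Dict String (PySem.Dict String Int)) : String × String × Int :=
  availD.items.foldl (fun best fpm =>
    fpm.2.items.foldl (fun best pc =>
      -- out[fname] is always present here; the `.getD empty` default is unreachable
      let spare := pc.2 - ((out.get? fpm.1).getD PySem.Dict.empty).getD pc.1 0
      if spare > best.2.2 then (fpm.1, pc.1, spare) else best) best) ("", "", -1)

-- out[f][p] = out[f].get(p, 0) + k  (k = 1 in A)
def pvBump (out : PySem.Dict String (PySem.Dict String Int)) (f p : String) (k : Int) :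
    PySem.Dict String (PySem.Dict String Int) :=
  let d := (out.get? f).getD PySem.Dict.empty
  out.insert f (d.insert p (d.getD p 0 + k))

-- A's `while need > 0` loop: fueled by need itself, which strictly decreases
def pvALoop (availD : PySem.Dict String (PySem.Dict String Int))
    (out : PySem.Dict String (PySem.Dict String Int)) (need : Int) :
    PySem.Dict String (PySem.Dict String Int) :=
  if need ≤ 0 then out
  else
    let b := pvAScan availD out
    if b.2.2 ≤ 0 then out
    else pvALoop availD (pvBump out b.1 b.2.1 1) (need - 1)
termination_by need.toNat
decreasing_by omega

def cap_quotas_to_availability (quotas : List (String × List (String × Int))) (avail : List (String × List (String × Int))) (target_n : Int) : List (String × List (String × Int)) :=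
  let quotasD := pvToDict quotas
  let availD := pvToDict avail
  -- for fname, pq in quotas.items(): out[fname][proto] = min(q, cap)
  let out := quotasD.items.foldl (fun out fpq =>
      let out := if out.contains fpq.1 then out else out.insert fpq.1 PySem.Dict.empty
      fpq.2.items.foldl (fun out pq =>
        let cap := ((availD.get? fpq.1).getD PySem.Dict.empty).getD pq.1 0
        let d := (out.get? fpq.1).getD PySem.Dict.empty
        out.insert fpq.1 (d.insert pq.1 (min pq.2 cap))) out) PySem.Dict.empty
  -- for fname, pmap in avail.items(): out[fname].setdefault(proto, 0)
  let out := availD.items.foldl (fun out fpm =>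
      let out := if out.contains fpm.1 then out else out.insert fpm.1 PySem.Dict.empty
      fpm.2.items.foldl (fun out pc =>
        let d := (out.get? fpm.1).getD PySem.Dict.empty
        out.insert fpm.1 (d.setdefault pc.1 0)) out) out
  let need := target_n - (out.values.map (fun d => d.values.sum)).sum
  (pvALoop availD out need).items.map (fun fd => (fd.1, fd.2.items))

-- ===== PORT B =====
-- Source B's _clip_then_register helper (clip quotas to caps, then zero-register every avail stratum)
def pvClipRegister (quotasD availD : PySem.Dict String (PySem.Dict String Int)) :
    PySem.Dict String (PySem.Dict String Int) :=
  let out := quotasD.items.foldl (fun out fpq =>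
      let out := if out.contains fpq.1 then out else out.insert fpq.1 PySem.Dict.empty
      fpq.2.items.foldl (fun out pq =>
        let cap := ((availD.get? fpq.1).getD PySem.Dict.empty).getD pq.1 0
        let d := (out.get? fpq.1).getD PySem.Dict.empty
        out.insert fpq.1 (d.insert pq.1 (min pq.2 cap))) out) PySem.Dict.empty
  availD.items.foldl (fun out fpm =>
      let out := if out.contains fpm.1 then out else out.insert fpm.1 PySem.Dict.empty
      fpm.2.items.foldl (fun out pc =>
        let d := (out.get? fpm.1).getD PySem.Dict.empty
        out.insert fpm.1 (d.setdefault pc.1 0)) out) out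

-- one pass computing best AND runner-up spare: ((bf, bp), bs, ss)
def pvBScan (availD : PySem.Dict String (PySem.Dict String Int))
    (out : PySem.Dict String (PySem.Dict String Int)) : (String × String) × Int × Int :=
  availD.items.foldl (fun st fpm =>
    fpm.2.items.foldl (fun st pc =>
      let s := pc.2 - ((out.get? fpm.1).getD PySem.Dict.empty).getD pc.1 0
      if s > st.2.1 then ((fpm.1, pc.1), s, st.2.1)
      else if s > st.2.2 then (st.1, st.2.1, s)
      else st) st) (("", ""), -1, -1)

-- B's bulk loop: assign the whole best/runner-up gap (capped by need, at least 1) in one step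
def pvBLoop (availD : PySem.Dict String (PySem.Dict String Int))
    (out : PySem.Dict String (PySem.Dict String Int)) (need : Int) :
    PySem.Dict String (PySem.Dict String Int) :=
  if need ≤ 0 then out
  else
    let b := pvBScan availD out
    if b.2.1 ≤ 0 then out
    else
      let step := min need (max (b.2.1 - max b.2.2 0) 1)
      pvBLoop availD (pvBump out b.1.1 b.1.2 step) (need - step)
termination_by need.toNat
decreasing_by omega

def cap_quotas_to_availability_alt (quotas : List (String × List (String × Int))) (avail : List (String × List (String × Int))) (target_n : Int) : List (String × List (String × Int)) :=
  let availD := pvToDict avail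
  let out := pvClipRegister (pvToDict quotas) availD
  let need := target_n - (out.values.map (fun d => d.values.sum)).sum
  (pvBLoop availD out need).items.map (fun fd => (fd.1, fd.2.items))

-- ===== PRECONDITION & SPEC =====
def Spec_cap_quotas_to_availability (quotas : List (String × List (String × Int))) (avail : List (String × List (String × Int))) (target_n : Int) (out : List (String × List (String × Int))) : Prop := out = cap_quotas_to_availability_alt quotas avail target_n
instance (quotas : List (String × List (String × Int))) (avail : List (String × List (String × Int))) (target_n : Int) (out : List (String × List (String × Int))) : Decidable (Spec_cap_quotas_to_availability quotas avail target_n out) := by unfold Spec_cap_quotas_to_availability; infer_instance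

-- ===== CLAIM (what is proved, stated in full; the proofs are below) =====
def Claim_equal_cap_quotas_to_availability : Prop := ∀ (quotas : List (String × List (String × Int))) (avail : List (String × List (String × Int))) (target_n : Int), Dom_cap_quotas_to_availability quotas avail target_n → Spec_cap_quotas_to_availability quotas avail target_n (cap_quotas_to_availability quotas avail target_n)

-- ===== LEMMAS AND PROOFS =====

-- proof-side view: spare per (fname, proto) stratum, flattened in avail iteration order
def pvLook (out : PySem.Dict String (PySem.Dict String Int)) (f p : String) : Int :=
  ((out.get? f).getD PySem.Dict.empty).getD p 0

def pvVals (availD out : PySem.Dict String (PySem.Dict String Int)) :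
    List ((String × String) × Int) :=
  availD.items.flatMap (fun fpm =>
    fpm.2.items.map (fun pc => ((fpm.1, pc.1), pc.2 - pvLook out fpm.1 pc.1)))

def pvScanA (l : List ((String × String) × Int)) (st : String × String × Int) :
    String × String × Int :=
  l.foldl (fun st kv => if kv.2 > st.2.2 then (kv.1.1, kv.1.2, kv.2) else st) st

def pvScanB (l : List ((String × String) × Int)) (st : (String × String) × Int × Int) :
    (String × String) × Int × Int :=
  l.foldl (fun st kv =>
    if kv.2 > st.2.1 then (kv.1, kv.2, st.2.1)
    else if kv.2 > st.2.2 then (st.1, st.2.1, kv.2) else st) st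

theorem pv_flatA (availD out : PySem.Dict String (PySem.Dict String Int)) :
    pvAScan availD out = pvScanA (pvVals availD out) ("", "", -1) := by
  unfold pvAScan pvVals
  generalize ("", "", (-1 : Int)) = st
  induction availD.items generalizing st with
  | nil => rfl
  | cons a l ih =>
    simp only [List.foldl_cons, List.flatMap_cons, pvScanA, List.foldl_append, List.foldl_map]
    rw [ih]
    rfl

theorem pv_flatB (availD out : PySem.Dict String (PySem.Dict String Int)) :
    pvBScan availD out = pvScanB (pvVals availD out) (("", ""), -1, -1) := by
  unfold pvBScan pvVals
  generalize (("", ""), (-1 : Int), (-1 : Int)) = st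
  induction availD.items generalizing st with
  | nil => rfl
  | cons a l ih =>
    simp only [List.foldl_cons, List.flatMap_cons, pvScanB, List.foldl_append, List.foldl_map]
    rw [ih]
    rfl

theorem pv_projAB (l : List ((String × String) × Int)) :
    ∀ st : (String × String) × Int × Int,
      pvScanA l (st.1.1, st.1.2, st.2.1) = ((pvScanB l st).1.1, (pvScanB l st).1.2, (pvScanB l st).2.1) := by
  induction l with
  | nil => intro st; rfl
  | cons kv l ih =>
    intro st
    simp only [pvScanA, pvScanB, List.foldl_cons] at *
    by_cases h1 : kv.2 > st.2.1
    · simp only [if_pos h1]; exact ih (kv.1, kv.2, st.2.1)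
    · simp only [if_neg h1]
      by_cases h2 : kv.2 > st.2.2
      · simp only [if_pos h2]; exact ih (st.1, st.2.1, kv.2)
      · simp only [if_neg h2]; exact ih st

theorem pv_scanA_skip (l : List ((String × String) × Int)) :
    ∀ st : String × String × Int, (∀ kv ∈ l, ¬ kv.2 > st.2.2) → pvScanA l st = st := by
  induction l with
  | nil => intro st _; rfl
  | cons kv l ih =>
    intro st h
    simp only [pvScanA, List.foldl_cons, if_neg (h kv (List.mem_cons_self ..))]
    exact ih st (fun x hx => h x (List.mem_cons_of_mem _ hx))

theorem pv_scanA_bs_lt (l : List ((String × String) × Int)) :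
    ∀ (st : String × String × Int) (c : Int), st.2.2 < c → (∀ kv ∈ l, kv.2 < c) →
      (pvScanA l st).2.2 < c := by
  induction l with
  | nil => intro st c h _; exact h
  | cons kv l ih =>
    intro st c h hall
    simp only [pvScanA, List.foldl_cons]
    by_cases h1 : kv.2 > st.2.2
    · simp only [if_pos h1]
      exact ih _ c (hall kv (List.mem_cons_self ..)) (fun x hx => hall x (List.mem_cons_of_mem _ hx))
    · simp only [if_neg h1]
      exact ih st c h (fun x hx => hall x (List.mem_cons_of_mem _ hx))

theorem pv_scanA_cons (kv : (String × String) × Int) (l : List ((String × String) × Int))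
    (st : String × String × Int) :
    pvScanA (kv :: l) st = pvScanA l (if kv.2 > st.2.2 then (kv.1.1, kv.1.2, kv.2) else st) := rfl

theorem pv_scanA_append (l1 l2 : List ((String × String) × Int)) (st : String × String × Int) :
    pvScanA (l1 ++ l2) st = pvScanA l2 (pvScanA l1 st) := by
  simp [pvScanA, List.foldl_append]

theorem pv_scanA_spec (l1 : List ((String × String) × Int)) (x : (String × String) × Int)
    (l2 : List ((String × String) × Int)) (hx : -1 < x.2)
    (h1 : ∀ kv ∈ l1, kv.2 < x.2) (h2 : ∀ kv ∈ l2, kv.2 ≤ x.2) :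
    pvScanA (l1 ++ x :: l2) ("", "", -1) = (x.1.1, x.1.2, x.2) := by
  have hst1 : (pvScanA l1 ("", "", -1)).2.2 < x.2 := pv_scanA_bs_lt l1 _ x.2 hx h1
  rw [pv_scanA_append, pv_scanA_cons, if_pos (show x.2 > (pvScanA l1 ("", "", -1)).2.2 from hst1)]
  exact pv_scanA_skip l2 (x.1.1, x.1.2, x.2) (fun kv hkv => by
    have := h2 kv hkv; simp only []; omega)

theorem pv_scanB_append (l1 l2 : List ((String × String) × Int)) (st : (String × String) × Int × Int) :
    pvScanB (l1 ++ l2) st = pvScanB l2 (pvScanB l1 st) := by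
  simp [pvScanB, List.foldl_append]

theorem pv_scanB_char (l : List ((String × String) × Int)) (bf bp : String) (bs ss : Int)
    (h : pvScanB l (("", ""), -1, -1) = ((bf, bp), bs, ss)) :
    (bs = -1 ∧ ss = -1 ∧ ∀ kv ∈ l, kv.2 ≤ -1) ∨
    (∃ l1 x l2, l = l1 ++ x :: l2 ∧ x.1 = (bf, bp) ∧ x.2 = bs ∧ ss ≤ bs ∧ -1 ≤ ss ∧
      (∀ kv ∈ l1, kv.2 < bs ∧ kv.2 ≤ ss) ∧ (∀ kv ∈ l2, kv.2 ≤ ss)) := by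
  induction l using List.reverseRecOn generalizing bf bp bs ss with
  | nil =>
    left
    simp only [pvScanB, List.foldl_nil, Prod.mk.injEq] at h
    exact ⟨h.2.1.symm, h.2.2.symm, by simp⟩
  | append_singleton l y ih =>
    rw [pv_scanB_append] at h
    rcases he : pvScanB l (("", ""), -1, -1) with ⟨⟨bf', bp'⟩, bs', ss'⟩
    rw [he] at h
    simp only [pvScanB, List.foldl_cons, List.foldl_nil] at h
    rcases ih bf' bp' bs' ss' he with ⟨hbs', hss', hall⟩ | ⟨l1, x, l2, hl, hx1, hx2, hle, hge, h1, h2⟩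
    · subst hbs'; subst hss'
      by_cases hy : y.2 > -1
      · rw [if_pos hy] at h
        simp only [Prod.mk.injEq] at h
        obtain ⟨hk, hv, hs⟩ := h
        right
        refine ⟨l, y, [], rfl, hk, hv, by omega, by omega, ?_, by simp⟩
        intro kv hkv
        have := hall kv hkv
        omega
      · rw [if_neg hy, if_neg (by simpa using hy)] at h
        simp only [Prod.mk.injEq] at h
        left
        refine ⟨h.2.1.symm, h.2.2.symm, ?_⟩
        intro kv hkv
        rcases List.mem_append.mp hkv with hm | hm
        · exact hall kv hm
        · simp at hm; subst hm; omega
    · by_cases hy : y.2 > bs'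
      · rw [if_pos hy] at h
        simp only [Prod.mk.injEq] at h
        obtain ⟨hk, hv, hs⟩ := h
        right
        refine ⟨l, y, [], rfl, hk, hv, by omega, by omega, ?_, by simp⟩
        intro kv hkv
        rw [hl] at hkv
        rcases List.mem_append.mp hkv with hm | hm
        · have := h1 kv hm; omega
        · rcases List.mem_cons.mp hm with hm' | hm'
          · subst hm'; omega
          · have := h2 kv hm'; omega
      · rw [if_neg hy] at h
        by_cases hy2 : y.2 > ss'
        · rw [if_pos hy2] at h
          simp only [Prod.mk.injEq] at h
          obtain ⟨hk, hv, hs⟩ := h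
          right
          obtain ⟨rfl, rfl⟩ := hk
          refine ⟨l1, x, l2 ++ [y], by rw [hl]; simp, by rw [hx1], by omega, by omega, by omega, ?_, ?_⟩
          · intro kv hkv
            have := h1 kv hkv
            omega
          · intro kv hkv
            rcases List.mem_append.mp hkv with hm | hm
            · have := h2 kv hm; omega
            · simp at hm; subst hm; omega
        · rw [if_neg hy2] at h
          simp only [Prod.mk.injEq] at h
          obtain ⟨hk, hv, hs⟩ := h
          right
          obtain ⟨rfl, rfl⟩ := hk
          refine ⟨l1, x, l2 ++ [y], by rw [hl]; simp, by rw [hx1], by omega, by omega, by omega, ?_, ?_⟩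
          · intro kv hkv
            have := h1 kv hkv
            omega
          · intro kv hkv
            rcases List.mem_append.mp hkv with hm | hm
            · have := h2 kv hm; omega
            · simp at hm; subst hm; omega

theorem pv_look_bump (out : PySem.Dict String (PySem.Dict String Int)) (f p f' p' : String) (k : Int) :
    pvLook (pvBump out f p k) f' p' = pvLook out f' p' + (if f' = f ∧ p' = p then k else 0) := by
  unfold pvLook pvBump
  simp only [PySem.Dict.get?_insert]
  by_cases hf : f' = f
  · subst hf
    simp only []
    by_cases hp : p' = p
    · subst hp; simp [PySem.Dict.getD_insert]
    · simp [PySem.Dict.getD_insert, hp]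
  · simp [hf]

theorem pv_vals_bump (availD out : PySem.Dict String (PySem.Dict String Int)) (f p : String) (k : Int) :
    pvVals availD (pvBump out f p k) =
      (pvVals availD out).map (fun kv => if kv.1 = (f, p) then (kv.1, kv.2 - k) else kv) := by
  unfold pvVals
  rw [List.map_flatMap]
  induction availD.items with
  | nil => rfl
  | cons a t ih =>
    simp only [List.flatMap_cons, ih]
    congr 1
    rw [List.map_map]
    apply List.map_congr_left
    intro pc _
    simp only [Function.comp_apply]
    rw [pv_look_bump]
    by_cases hc : ((a.1, pc.1) : String × String) = (f, p)
    · have hf : a.1 = f ∧ pc.1 = p := by simpa [Prod.ext_iff] using hc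
      simp only [hf.1, hf.2, and_self, if_true, Prod.mk.injEq, true_and]
      ring
    · have hnc : ¬(a.1 = f ∧ pc.1 = p) := by simpa [Prod.ext_iff] using hc
      simp [hc, hnc]

theorem pv_bump_bump (out : PySem.Dict String (PySem.Dict String Int)) (f p : String) (j i : Int) :
    pvBump (pvBump out f p j) f p i = pvBump out f p (j + i) := by
  unfold pvBump
  rw [PySem.Dict.get?_insert_self]
  simp only [Option.getD_some, PySem.Dict.getD_insert_self, PySem.Dict.insert_insert_self,
    PySem.Dict.insert_insert_self]
  ring_nf

theorem pv_aloop_unfold (availD out : PySem.Dict String (PySem.Dict String Int)) (need : Int) :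
    pvALoop availD out need =
      if need ≤ 0 then out
      else
        let b := pvAScan availD out
        if b.2.2 ≤ 0 then out
        else pvALoop availD (pvBump out b.1 b.2.1 1) (need - 1) := by
  rw [pvALoop]

theorem pv_bloop_unfold (availD out : PySem.Dict String (PySem.Dict String Int)) (need : Int) :
    pvBLoop availD out need =
      if need ≤ 0 then out
      else
        let b := pvBScan availD out
        if b.2.1 ≤ 0 then out
        else
          let step := min need (max (b.2.1 - max b.2.2 0) 1)
          pvBLoop availD (pvBump out b.1.1 b.1.2 step) (need - step) := by
  rw [pvBLoop]

theorem pv_a_bulk (availD : PySem.Dict String (PySem.Dict String Int)) :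
    ∀ (k : Nat) (out : PySem.Dict String (PySem.Dict String Int)) (need : Int)
      (l1 : List ((String × String) × Int)) (x : (String × String) × Int)
      (l2 : List ((String × String) × Int)) (ss : Int),
      pvVals availD out = l1 ++ x :: l2 → 0 < x.2 → ss ≤ x.2 →
      (∀ kv ∈ l1, kv.2 < x.2 ∧ kv.2 ≤ ss) → (∀ kv ∈ l2, kv.2 ≤ ss) →
      1 ≤ k → (k : Int) ≤ need → (k = 1 ∨ max ss 0 < x.2 - ((k : Int) - 1)) →
      pvALoop availD out need = pvALoop availD (pvBump out x.1.1 x.1.2 (k : Int)) (need - (k : Int)) := by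
  intro k
  induction k with
  | zero => intro _ _ _ _ _ _ _ _ _ _ _ hk _ _; omega
  | succ n ih =>
    intro out need l1 x l2 ss hvals hx hssx h1 h2 _ hkn hcond
    by_cases hn : n = 0
    · -- single unit step
      subst hn
      rw [pv_aloop_unfold]
      have hscan : pvAScan availD out = (x.1.1, x.1.2, x.2) := by
        rw [pv_flatA, hvals]
        exact pv_scanA_spec l1 x l2 (by omega) (fun kv h => (h1 kv h).1)
          (fun kv h => le_trans (h2 kv h) hssx)
      simp only [hscan]
      rw [if_neg (by push_cast at hkn; omega), if_neg (by simp; omega)]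
      norm_num
    · -- n ≥ 1 : do n unit steps (IH), then one more
      have hn1 : 1 ≤ n := by omega
      have hmax : max ss 0 < x.2 - (n : Int) := by
        rcases hcond with hc | hc
        · omega
        · omega
      rw [ih out need l1 x l2 ss hvals hx hssx h1 h2 hn1 (by omega)
        (Or.inr (by omega))]
      set out' := pvBump out x.1.1 x.1.2 (n : Int) with hout'
      have hvals' : pvVals availD out' =
          (l1.map (fun kv => if kv.1 = (x.1.1, x.1.2) then (kv.1, kv.2 - (n : Int)) else kv)) ++
          (x.1, x.2 - (n : Int)) ::
          (l2.map (fun kv => if kv.1 = (x.1.1, x.1.2) then (kv.1, kv.2 - (n : Int)) else kv)) := by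
        rw [hout', pv_vals_bump, hvals]
        simp only [List.map_append, List.map_cons]
        simp
      rw [pv_aloop_unfold]
      have hscan : pvAScan availD out' = (x.1.1, x.1.2, x.2 - n) := by
        rw [pv_flatA, hvals']
        have := pv_scanA_spec
          (l1.map (fun kv => if kv.1 = (x.1.1, x.1.2) then (kv.1, kv.2 - n) else kv))
          ((x.1, x.2 - n))
          (l2.map (fun kv => if kv.1 = (x.1.1, x.1.2) then (kv.1, kv.2 - n) else kv))
          (by simp; omega)
          (by
            intro kv hkv
            rcases List.mem_map.mp hkv with ⟨kv0, hm, rfl⟩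
            have hb := h1 kv0 hm
            by_cases hc : kv0.1 = (x.1.1, x.1.2) <;> simp [hc] <;> omega)
          (by
            intro kv hkv
            rcases List.mem_map.mp hkv with ⟨kv0, hm, rfl⟩
            have hb := h2 kv0 hm
            by_cases hc : kv0.1 = (x.1.1, x.1.2) <;> simp [hc] <;> omega)
        simpa using this
      simp only [hscan]
      rw [if_neg (by push_cast at hkn; omega), if_neg (by simp; omega)]
      rw [pv_bump_bump]
      push_cast
      ring_nf

theorem pv_loops_eq (availD out : PySem.Dict String (PySem.Dict String Int)) (need : Int) :
    pvALoop availD out need = pvBLoop availD out need := by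
  have key : ∀ (n : Nat) (out : PySem.Dict String (PySem.Dict String Int)) (need : Int),
      need.toNat ≤ n → pvALoop availD out need = pvBLoop availD out need := by
    intro n
    induction n with
    | zero =>
      intro out need hn
      rw [pv_aloop_unfold, pv_bloop_unfold, if_pos (by omega), if_pos (by omega)]
    | succ n ih =>
      intro out need hn
      by_cases hneed : need ≤ 0
      · rw [pv_aloop_unfold, pv_bloop_unfold, if_pos hneed, if_pos hneed]
      · rcases hr : pvBScan availD out with ⟨⟨bf, bp⟩, bs, ss⟩
        have hAscan : pvAScan availD out = (bf, bp, bs) := by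
          rw [pv_flatA]
          have := pv_projAB (pvVals availD out) (("", ""), -1, -1)
          rw [← pv_flatB, hr] at this
          simpa using this
        by_cases hbs : bs ≤ 0
        · rw [pv_aloop_unfold, pv_bloop_unfold, if_neg hneed, if_neg hneed]
          simp only [hAscan, hr]
          rw [if_pos hbs, if_pos hbs]
        · have hrflat := hr
          rw [pv_flatB] at hrflat
          rcases pv_scanB_char _ _ _ _ _ hrflat with ⟨hbs', _, _⟩ | ⟨l1, x, l2, hl, hx1, hx2, hle, hge, h1, h2⟩
          · omega
          · set step := min need (max (bs - max ss 0) 1) with hstep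
            have hstep1 : 1 ≤ step := by omega
            have hstepn : step ≤ need := by omega
            have hbulk := pv_a_bulk availD step.toNat out need l1 x l2 ss hl (by omega)
              (by omega) (by intro kv h; have := h1 kv h; omega) h2
              (by omega) (by omega)
              (by
                by_cases h1' : step = 1
                · left; omega
                · right; omega)
            rw [Int.toNat_of_nonneg (by omega)] at hbulk
            have hx11 : x.1.1 = bf := by rw [hx1]
            have hx12 : x.1.2 = bp := by rw [hx1]
            rw [hx11, hx12] at hbulk
            rw [hbulk, ih _ _ (by omega)]
            conv_rhs => rw [pv_bloop_unfold]
            rw [if_neg hneed]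
            simp only [hr]
            rw [if_neg hbs, ← hstep]
  exact key need.toNat out need le_rfl
-- ===== VERDICT (by name: the statement is the Claim_ definition above) =====
theorem cap_quotas_to_availability_spec : Claim_equal_cap_quotas_to_availability := by
  intro quotas avail target_n _
  unfold Spec_cap_quotas_to_availability cap_quotas_to_availability cap_quotas_to_availability_alt pvClipRegister
  simp only [pv_loops_eq]
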